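-- pv_equiv track=rewrite | github.com/NithishRaja/daily_tasks | src/tweet/tweetGetter.py | annotateText
-- ===== SOURCE A (Python) =====
-- def annotateText(text):
--     """Mark words beginning with '#' or '@'.
--
--     Keyword Arguments:
--     text -- string
--     """
--     # Initialise variable for annotated text
--     annotatedText = []
--     # Initialise temp variable to hold string
--     previous = ""
--     # Initialise flag
--     flag = True
--     # Iterate over text
--     for j in range(len(text)):
--         # Check if previous string is text
--         if flag:
--             # Check if current character is hashtag
--             if text[j] == "#" or text[j] == "@":
--                 if len(previous) > 0:
--                     # Push previous into array
--                     annotatedText.append({"text": previous, "type": "text"})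
--                 # Reset previous
--                 previous = ""
--                 # Update flag
--                 flag = False
--         else:
--             # Check if current character is space
--             if text[j] == " ":
--                 if len(previous) > 0:
--                     # Push previous into array
--                     annotatedText.append({"text": previous, "type": "special"})
--                 # Reset previous
--                 previous = ""
--                 # Update flag
--                 flag = True
--         # Add current character to previous
--         previous = previous + text[j]
--
--     if len(previous) > 0:
--         # Push previous into array
--         annotatedText.append({"text": previous, "type": "text" if flag else "hashtag"})
--     # Return annotated text
--     return annotatedText
-- ===== SOURCE B (Python) =====
-- def annotateText(text):
--     """Mark words beginning with '#' or '@'.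
--
--     Keyword Arguments:
--     text -- string
--     """
--     segs = []
--     i, n = 0, len(text)
--     while i < n:
--         # scan the plain-text run up to the next '#'/'@'
--         j = i
--         while j < n and text[j] != "#" and text[j] != "@":
--             j += 1
--         if j > i:
--             segs.append({"text": text[i:j], "type": "text"})
--         if j >= n:
--             break
--         # scan the special run: the marker plus everything up to the next space
--         k = j + 1
--         while k < n and text[k] != " ":
--             k += 1
--         segs.append({"text": text[j:k], "type": "special"})
--         i = k
--     # only a special run reaching the end of the string is a hashtag
--     if segs and segs[-1]["type"] == "special":
--         segs[-1]["type"] = "hashtag"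
--     return segs
-- ===== Notes on version B (the rewrite author's own statement) =====
-- stated objective: alternative
-- what changed: Replaces A's per-character flag/accumulator state machine by a segment scanner that extracts each whole text run (up to the next '#'/'@') and special run (marker up to the next space) with span scans and then relabels only a final special run as 'hashtag'.
import Mathlib
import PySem

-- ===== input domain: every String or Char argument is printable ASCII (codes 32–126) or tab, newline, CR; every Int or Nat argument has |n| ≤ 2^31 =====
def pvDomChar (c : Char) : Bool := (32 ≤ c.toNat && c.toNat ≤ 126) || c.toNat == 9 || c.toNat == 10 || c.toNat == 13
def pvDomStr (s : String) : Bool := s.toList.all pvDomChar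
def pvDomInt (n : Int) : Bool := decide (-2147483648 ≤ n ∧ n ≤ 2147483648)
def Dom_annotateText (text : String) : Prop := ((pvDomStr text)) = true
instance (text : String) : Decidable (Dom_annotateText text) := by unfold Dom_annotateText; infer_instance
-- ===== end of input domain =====

-- B re-implements A's per-character state machine as a segment scanner: it extracts whole
-- text/special runs with span scans and relabels only the final special run as "hashtag";
-- same return value, different algorithm (objective: alternative).

-- ===== PORT A =====
-- one iteration of A's for-loop: state = (annotatedText, previous, flag)
def aStep (st : List (List (String × String)) × List Char × Bool) (c : Char) :
    List (List (String × String)) × List Char × Bool :=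
  let (ann, prev, flag) := st
  if flag then
    if c == '#' || c == '@' then
      ((if prev.length > 0 then ann ++ [[("text", String.mk prev), ("type", "text")]] else ann),
       [c], false)
    else (ann, prev ++ [c], true)
  else
    if c == ' ' then
      ((if prev.length > 0 then ann ++ [[("text", String.mk prev), ("type", "special")]] else ann),
       [c], true)
    else (ann, prev ++ [c], false)

-- A's final flush after the loop
def aFinish (st : List (List (String × String)) × List Char × Bool) :
    List (List (String × String)) :=
  if st.2.1.length > 0 then
    st.1 ++ [[("text", String.mk st.2.1), ("type", if st.2.2 then "text" else "hashtag")]]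
  else st.1

def annotateText (text : String) : List (List (String × String)) :=
  aFinish (text.toList.foldl aStep ([], [], true))

-- ===== PORT B =====
-- predicate for the text-run scan (`text[j] != "#" and text[j] != "@"`)
def pTxt (c : Char) : Bool := !(c == '#' || c == '@')
-- predicate for the special-run scan (`text[k] != " "`)
def pSp (c : Char) : Bool := !(c == ' ')

-- the inner `while` scans of B: longest prefix satisfying p, and the rest
def bSpan (p : Char → Bool) : List Char → List Char × List Char
  | [] => ([], [])
  | c :: t => if p c then let r := bSpan p t; (c :: r.1, r.2) else ([], c :: t)

lemma bSpan_snd_length_le (p : Char → Bool) : ∀ l : List Char, (bSpan p l).2.length ≤ l.length := by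
  intro l
  induction l with
  | nil => simp [bSpan]
  | cons c t ih => simp only [bSpan]; split <;> simp <;> omega

-- the text segment emitted at the top of one outer iteration (`if j > i`)
def bHead (cs : List Char) : List (List (String × String)) :=
  if (bSpan pTxt cs).1.length > 0 then
    [[("text", String.mk (bSpan pTxt cs).1), ("type", "text")]]
  else []

-- B's outer while-loop: emit the text run, then (unless at the end) the special run, repeat
def bGo (cs : List Char) : List (List (String × String)) :=
  match hcs : (bSpan pTxt cs).2 with
  | [] => bHead cs
  | c :: t =>
      bHead cs ++
        ([("text", String.mk (c :: (bSpan pSp t).1)), ("type", "special")] :: bGo (bSpan pSp t).2)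
termination_by cs.length
decreasing_by
  have h1 := bSpan_snd_length_le pTxt cs
  have h2 := bSpan_snd_length_le pSp t
  rw [hcs] at h1
  simp at h1
  omega

-- B's final fixup: `if segs and segs[-1]["type"] == "special": segs[-1]["type"] = "hashtag"`
def bFix (segs : List (List (String × String))) : List (List (String × String)) :=
  match segs.getLast? with
  | none => segs
  | some last =>
      if PySem.Dict.get? ⟨last⟩ "type" == some "special" then
        segs.dropLast ++ [(PySem.Dict.insert ⟨last⟩ "type" "hashtag").items]
      else segs

def annotateText_alt (text : String) : List (List (String × String)) :=
  bFix (bGo text.toList)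

-- ===== PRECONDITION & SPEC =====
def Spec_annotateText (text : String) (out : List (List (String × String))) : Prop := out = annotateText_alt text
instance (text : String) (out : List (List (String × String))) : Decidable (Spec_annotateText text out) := by unfold Spec_annotateText; infer_instance

-- ===== CLAIM (what is proved, stated in full; the proofs are below) =====
def Claim_equal_annotateText : Prop := ∀ (text : String), Dom_annotateText text → Spec_annotateText text (annotateText text)

-- ===== LEMMAS AND PROOFS =====

-- A's loop rewritten as structural recursion, with the type of the final segment a parameter:
-- ty = "hashtag" gives A exactly; ty = "special" gives the variant that bFix relabels.
def runAg (ty : String) : List Char → List Char → Bool → List (List (String × String))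
  | [], prev, flag =>
      if prev.length > 0 then [[("text", String.mk prev), ("type", if flag then "text" else ty)]]
      else []
  | c :: t, prev, flag =>
      if flag then
        if c == '#' || c == '@' then
          (if prev.length > 0 then [[("text", String.mk prev), ("type", "text")]] else []) ++
            runAg ty t [c] false
        else runAg ty t (prev ++ [c]) true
      else
        if c == ' ' then
          (if prev.length > 0 then [[("text", String.mk prev), ("type", "special")]] else []) ++
            runAg ty t [c] true
        else runAg ty t (prev ++ [c]) false

lemma foldA (cs : List Char) : ∀ (ann : List (List (String × String))) (prev : List Char) (flag : Bool),
    aFinish (cs.foldl aStep (ann, prev, flag)) = ann ++ runAg "hashtag" cs prev flag := by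
  induction cs with
  | nil =>
      intro ann prev flag
      simp only [List.foldl_nil, aFinish, runAg]
      split <;> simp
  | cons c t ih =>
      intro ann prev flag
      simp only [List.foldl_cons, runAg, aStep]
      cases flag with
      | true =>
          by_cases hc : (c == '#' || c == '@') = true <;>
            simp [hc, ih, List.append_assoc] <;> split <;> simp
      | false =>
          by_cases hc : (c == ' ') = true <;>
            simp [hc, ih, List.append_assoc] <;> split <;> simp

lemma runAg_ne_nil (ty : String) : ∀ (cs prev : List Char) (flag : Bool), prev ≠ [] →
    runAg ty cs prev flag ≠ [] := by
  intro cs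
  induction cs with
  | nil =>
      intro prev flag h
      have : prev.length > 0 := List.length_pos_iff.mpr h
      simp [runAg, this]
  | cons c t ih =>
      intro prev flag h
      cases flag with
      | true =>
          by_cases hc : (c == '#' || c == '@') = true
          · simp only [runAg, hc, if_true]
            exact List.append_ne_nil_of_right_ne_nil _ (ih [c] false (by simp))
          · simp only [runAg, hc, Bool.false_eq_true, if_false, if_true]
            exact ih (prev ++ [c]) true (by simp)
      | false =>
          by_cases hc : (c == ' ') = true
          · simp only [runAg, hc, if_true, Bool.false_eq_true, if_false]
            exact List.append_ne_nil_of_right_ne_nil _ (ih [c] true (by simp))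
          · simp only [runAg, hc, Bool.false_eq_true, if_false]
            exact ih (prev ++ [c]) false (by simp)

lemma bFix_append (X Y : List (List (String × String))) (h : Y ≠ []) :
    bFix (X ++ Y) = X ++ bFix Y := by
  rcases List.eq_nil_or_concat Y with rfl | ⟨Y', z, rfl⟩
  · exact absurd rfl h
  · simp only [bFix, List.concat_eq_append, ← List.append_assoc, List.getLast?_concat,
      List.dropLast_concat]
    split <;> simp [List.append_assoc]

lemma bFix_singleton_text (s : String) (ty : String) (h : ty ≠ "special") :
    bFix [[("text", s), ("type", ty)]] = [[("text", s), ("type", ty)]] := by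
  have hcond : (PySem.Dict.get? (⟨[("text", s), ("type", ty)]⟩ : PySem.Dict String String) "type"
      == some "special") = false := by
    simp [PySem.Dict.get?_mk_cons]
    exact h
  simp [bFix, List.getLast?_singleton, hcond]

lemma bFix_singleton_special (s : String) :
    bFix [[("text", s), ("type", "special")]] = [[("text", s), ("type", "hashtag")]] := by
  rfl

lemma fix_runAg : ∀ (cs prev : List Char) (flag : Bool),
    bFix (runAg "special" cs prev flag) = runAg "hashtag" cs prev flag := by
  intro cs
  induction cs with
  | nil =>
      intro prev flag
      simp only [runAg]
      split
      · cases flag with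
        | true => simpa using bFix_singleton_text (String.mk prev) "text" (by decide)
        | false => simpa using bFix_singleton_special (String.mk prev)
      · rfl
  | cons c t ih =>
      intro prev flag
      cases flag with
      | true =>
          by_cases hc : (c == '#' || c == '@') = true
          · simp only [runAg, hc, if_true]
            rw [bFix_append _ _ (runAg_ne_nil _ t [c] false (by simp)), ih]
          · simp only [runAg, hc, Bool.false_eq_true, if_false, if_true]
            exact ih (prev ++ [c]) true
      | false =>
          by_cases hc : (c == ' ') = true
          · simp only [runAg, hc, if_true, Bool.false_eq_true, if_false]
            rw [bFix_append _ _ (runAg_ne_nil _ t [c] true (by simp)), ih]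
          · simp only [runAg, hc, Bool.false_eq_true, if_false]
            exact ih (prev ++ [c]) false

lemma bSpan_nil (p : Char → Bool) : bSpan p [] = ([], []) := rfl

lemma bSpan_cons_true {p : Char → Bool} {c : Char} (t : List Char) (h : p c = true) :
    bSpan p (c :: t) = (c :: (bSpan p t).1, (bSpan p t).2) := by
  simp [bSpan, h]

lemma bSpan_cons_false {p : Char → Bool} {c : Char} (t : List Char) (h : p c = false) :
    bSpan p (c :: t) = ([], c :: t) := by
  simp [bSpan, h]

lemma bSpan_all (p : Char → Bool) : ∀ (a r : List Char), (∀ c ∈ a, p c = true) →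
    bSpan p (a ++ r) = (a ++ (bSpan p r).1, (bSpan p r).2) := by
  intro a
  induction a with
  | nil => intro r _; simp
  | cons c a' ih =>
      intro r h
      have hc : p c = true := h c (by simp)
      simp only [List.cons_append, bSpan_cons_true _ hc, ih r (fun x hx => h x (by simp [hx]))]

lemma bGo_eq_nil (cs : List Char) (h : (bSpan pTxt cs).2 = []) : bGo cs = bHead cs := by
  rw [bGo]
  split <;> simp_all

lemma bGo_eq_cons (cs : List Char) (c : Char) (t : List Char)
    (h : (bSpan pTxt cs).2 = c :: t) :
    bGo cs = bHead cs ++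
      ([("text", String.mk (c :: (bSpan pSp t).1)), ("type", "special")] :: bGo (bSpan pSp t).2) := by
  rw [bGo]
  split <;> simp_all

lemma bGo_nil : bGo [] = [] := by
  rw [bGo_eq_nil [] rfl]
  rfl

lemma main_lemma : ∀ (n : Nat) (cs : List Char), cs.length ≤ n →
    (∀ prev : List Char, (∀ c ∈ prev, pTxt c = true) →
      runAg "special" cs prev true = bGo (prev ++ cs)) ∧
    (∀ acc : List Char, acc ≠ [] →
      runAg "special" cs acc false =
        [("text", String.mk (acc ++ (bSpan pSp cs).1)), ("type", "special")] ::
          bGo (bSpan pSp cs).2) := by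
  intro n
  induction n with
  | zero =>
      intro cs hlen
      have : cs = [] := List.eq_nil_of_length_eq_zero (Nat.le_zero.mp hlen)
      subst this
      constructor
      · intro prev hprev
        have hsp : bSpan pTxt prev = (prev, []) := by
          simpa [bSpan_nil] using bSpan_all pTxt prev [] hprev
        rw [List.append_nil, bGo_eq_nil _ (by rw [hsp])]
        simp [runAg, bHead, hsp]
      · intro acc hacc
        have : acc.length > 0 := List.length_pos_iff.mpr hacc
        simp [runAg, this, bSpan_nil, bGo_nil]
  | succ n ih =>
      intro cs hlen
      cases cs with
      | nil =>
          exact ih [] (by simp)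
      | cons c t =>
          have hlt : t.length ≤ n := by simpa using hlen
          constructor
          · intro prev hprev
            by_cases hc : (c == '#' || c == '@') = true
            · -- marker: flush text, enter special phase
              have hpt : pTxt c = false := by simp [pTxt, hc]
              have hsp : bSpan pTxt (prev ++ c :: t) = (prev, c :: t) := by
                simpa [bSpan_cons_false t hpt] using bSpan_all pTxt prev (c :: t) hprev
              rw [bGo_eq_cons _ c t (by rw [hsp])]
              have hspec := (ih t hlt).2 [c] (by simp)
              simp only [runAg, hc, if_true]
              rw [hspec]
              simp [bHead, hsp]
            · -- ordinary char: stays in the text run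
              have hpt : pTxt c = true := by
                simp only [pTxt, Bool.not_eq_true']; exact Bool.not_eq_true _ ▸ (by simpa using hc)
              have := (ih t hlt).1 (prev ++ [c])
                (by intro x hx; rcases List.mem_append.mp hx with h | h
                    · exact hprev x h
                    · simp at h; subst h; exact hpt)
              simp only [runAg, hc, Bool.false_eq_true, if_false, if_true]
              rw [this]
              simp
          · intro acc hacc
            by_cases hc : (c == ' ') = true
            · -- space ends the special run; the space starts the next text run
              have hps : pSp c = false := by simp [pSp, hc]
              have hcq : c = ' ' := by simpa using hc
              have htxt := (ih t hlt).1 [c] (by simp [pTxt, hcq])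
              have hlp : acc.length > 0 := List.length_pos_iff.mpr hacc
              simp only [runAg, hc, if_true, hlp, if_pos]
              rw [htxt, bSpan_cons_false t hps]
              simp
            · -- non-space extends the special run
              have hps : pSp c = true := by simp only [pSp, Bool.not_eq_true']; simpa using hc
              have := (ih t hlt).2 (acc ++ [c]) (by simp)
              simp only [runAg, hc, Bool.false_eq_true, if_false]
              rw [this, bSpan_cons_true t hps]
              simp

-- ===== VERDICT (by name: the statement is the Claim_ definition above) =====
theorem annotateText_spec : Claim_equal_annotateText := by
  intro text _
  unfold Spec_annotateText annotateText annotateText_alt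
  rw [foldA]
  have h1 := (main_lemma text.toList.length text.toList le_rfl).1 [] (by simp)
  simp only [List.nil_append] at h1 ⊢
  rw [← fix_runAg, h1]
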